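-- pv_equiv track=rewrite | github.com/YanjieHe/TypedCygni | byte_code_helper/helper.py | add_casts
-- ===== SOURCE A (Python) =====
-- def add_casts(opcode_list):
--     result = opcode_list.copy()
--     basic_types = ["I32", "I64", "F32", "F64"]
--     for i in range(len(basic_types)):
--         for j in range(i + 1, len(basic_types)):
--             type_1 = basic_types[i]
--             type_2 = basic_types[j]
--             result.append("CAST_{0}_TO_{1}".format(type_1, type_2))
--             result.append("CAST_{0}_TO_{1}".format(type_2, type_1))
--     return result
-- ===== SOURCE B (Python) =====
-- CAST_OPCODES = [
--     "CAST_I32_TO_I64", "CAST_I64_TO_I32",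
--     "CAST_I32_TO_F32", "CAST_F32_TO_I32",
--     "CAST_I32_TO_F64", "CAST_F64_TO_I32",
--     "CAST_I64_TO_F32", "CAST_F32_TO_I64",
--     "CAST_I64_TO_F64", "CAST_F64_TO_I64",
--     "CAST_F32_TO_F64", "CAST_F64_TO_F32",
-- ]
--
-- def add_casts(opcode_list):
--     return opcode_list + CAST_OPCODES
-- ===== Notes on version B (the rewrite author's own statement) =====
-- stated objective: simpler
-- what changed: Replaces the nested index loops and per-iteration string formatting with a single concatenation of the input with a precomputed literal list of the 12 cast opcodes in A's exact emission order.
import Mathlib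
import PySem

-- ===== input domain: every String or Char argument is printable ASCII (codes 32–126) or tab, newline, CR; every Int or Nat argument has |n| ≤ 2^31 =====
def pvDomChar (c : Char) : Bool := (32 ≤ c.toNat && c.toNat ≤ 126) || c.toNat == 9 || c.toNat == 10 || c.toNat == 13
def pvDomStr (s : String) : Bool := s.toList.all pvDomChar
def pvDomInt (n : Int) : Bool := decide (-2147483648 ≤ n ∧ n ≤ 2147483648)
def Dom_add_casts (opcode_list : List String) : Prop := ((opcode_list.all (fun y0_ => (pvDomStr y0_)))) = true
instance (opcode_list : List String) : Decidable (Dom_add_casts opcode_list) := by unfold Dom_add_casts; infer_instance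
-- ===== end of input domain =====

-- ===== PORT A =====
-- B replaces the nested loops with one concatenation of a literal opcode list (return value only; A does not mutate its argument).
def add_casts (opcode_list : List String) : List String :=
  let basic_types : List String := ["I32", "I64", "F32", "F64"]
  (PySem.List.pyRange 0 (Int.ofNat basic_types.length) 1).foldl (fun result i =>
    (PySem.List.pyRange (i + 1) (Int.ofNat basic_types.length) 1).foldl (fun result j =>
      match PySem.List.pyGet? basic_types i, PySem.List.pyGet? basic_types j with
      | some type_1, some type_2 =>
          result ++ ["CAST_" ++ type_1 ++ "_TO_" ++ type_2]
                 ++ ["CAST_" ++ type_2 ++ "_TO_" ++ type_1]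
      | _, _ => result) result) opcode_list

-- ===== PORT B =====
def castOpcodes : List String :=
  [ "CAST_I32_TO_I64", "CAST_I64_TO_I32",
    "CAST_I32_TO_F32", "CAST_F32_TO_I32",
    "CAST_I32_TO_F64", "CAST_F64_TO_I32",
    "CAST_I64_TO_F32", "CAST_F32_TO_I64",
    "CAST_I64_TO_F64", "CAST_F64_TO_I64",
    "CAST_F32_TO_F64", "CAST_F64_TO_F32" ]

def add_casts_alt (opcode_list : List String) : List String :=
  opcode_list ++ castOpcodes

-- ===== PRECONDITION & SPEC =====
def Spec_add_casts (opcode_list : List String) (out : List String) : Prop := out = add_casts_alt opcode_list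
instance (opcode_list : List String) (out : List String) : Decidable (Spec_add_casts opcode_list out) := by unfold Spec_add_casts; infer_instance

-- ===== CLAIM (what is proved, stated in full; the proofs are below) =====
def Claim_equal_add_casts : Prop := ∀ (opcode_list : List String), Dom_add_casts opcode_list → Spec_add_casts opcode_list (add_casts opcode_list)

-- ===== LEMMAS AND PROOFS =====

-- ===== VERDICT (by name: the statement is the Claim_ definition above) =====
theorem add_casts_spec : Claim_equal_add_casts := by
  intro l _
  unfold Spec_add_casts add_casts add_casts_alt castOpcodes
  simp [PySem.List.pyRange, PySem.List.pyGet?, PySem.List.pyIdx?, List.range_succ]
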